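-- pv_equiv track=rewrite | github.com/Xiaba2203/Programaci-n-avanza-da-UPCH-2025-2 | lab-progra-avanzada/lab1/lab1.1/Chavarria74032240/Chavarria74032240/P2.py | encontrar_genes
-- ===== SOURCE A (Python) =====
-- def encontrar_genes(genoma):
--     stop_codons = {"TAG", "TAA", "TGA"}  # codones de parada
--     genes = []  # lista de genes encontrados
--     i = 0
--     while i < len(genoma) - 2:  # recorrer el genoma
--         if genoma[i:i+3] == "ATG":  # inicio de gen
--             for j in range(i+3, len(genoma)-2, 3):  # avanzar de 3 en 3
--                 codon = genoma[j:j+3]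
--                 if codon in stop_codons:  # si es stop
--                     gen = genoma[i+3:j]  # extraer el gen
--                     if gen and all(gen[k:k+3] not in ["ATG", "TAG", "TAA", "TGA"] for k in range(0, len(gen), 3)):
--                         genes.append(gen)  # guardar el gen
--                     i = j
--                     break
--         i += 1
--     return genes if genes else ["No se encontró ningún gen"]
-- ===== SOURCE B (Python) =====
-- def encontrar_genes(genoma):
--     n = len(genoma)
--     stops = ("TAG", "TAA", "TGA")
--     # one backward pass: for every position p, the first in-frame stop/ATG at q >= p
--     # (q ≡ p mod 3, q+3 <= n); built back-to-front, three None sentinels for p+3 overflow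
--     rev_stop = [None, None, None]
--     rev_atg = [None, None, None]
--     for p in range(n - 3, -1, -1):
--         cod = genoma[p:p+3]
--         rev_stop.append(p if cod in stops else rev_stop[-3])
--         rev_atg.append(p if cod == "ATG" else rev_atg[-3])
--     next_stop = list(reversed(rev_stop))
--     next_atg = list(reversed(rev_atg))
--     genes = []
--     i = 0
--     while i < n - 2:
--         if genoma[i:i+3] == "ATG":
--             j = next_stop[i + 3]
--             if j is None:
--                 i += 1
--                 continue
--             if j > i + 3:
--                 a = next_atg[i + 3]
--                 if a is None or a >= j:
--                     genes.append(genoma[i+3:j])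
--             i = j + 1
--         else:
--             i += 1
--     return genes if genes else ["No se encontró ningún gen"]
-- ===== Notes on version B (the rewrite author's own statement) =====
-- stated objective: alternative
-- what changed: A rescans forward from each ATG to find the in-frame stop codon; B instead precomputes next-in-frame-stop and next-in-frame-ATG tables in one backward pass and answers each ATG by two table lookups.
import Mathlib
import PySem

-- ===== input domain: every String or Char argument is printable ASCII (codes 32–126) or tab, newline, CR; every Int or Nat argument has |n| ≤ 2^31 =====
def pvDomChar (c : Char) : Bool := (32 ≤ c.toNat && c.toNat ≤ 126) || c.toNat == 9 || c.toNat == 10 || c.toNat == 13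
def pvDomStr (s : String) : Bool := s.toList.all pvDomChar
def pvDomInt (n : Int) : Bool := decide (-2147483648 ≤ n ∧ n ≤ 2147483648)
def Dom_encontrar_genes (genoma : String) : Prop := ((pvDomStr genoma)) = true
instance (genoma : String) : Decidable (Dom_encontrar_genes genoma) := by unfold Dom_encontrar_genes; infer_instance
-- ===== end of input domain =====

-- B replaces A's forward rescan after every ATG by two next-in-frame tables (stop / ATG)
-- built in one backward pass, so each ATG is answered by two lookups.

-- ===== PORT A =====
def pvStops : List (List Char) := [['T','A','G'], ['T','A','A'], ['T','G','A']]
def pvAll4 : List (List Char) := [['A','T','G'], ['T','A','G'], ['T','A','A'], ['T','G','A']]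

-- A's 'for j in range(i+3, len(genoma)-2, 3): … break' loop
def pvInnerA (g : List Char) (i : Int) (genes : List String) : List Int → Int × List String
  | [] => (i, genes)
  | j :: rest =>
    let codon := PySem.List.slice g (some j) (some (j+3))
    if codon ∈ pvStops then
      let gen := PySem.List.slice g (some (i+3)) (some j)
      if gen ≠ [] ∧ (PySem.List.pyRange 0 (gen.length : Int) 3).all
          (fun k => decide (PySem.List.slice gen (some k) (some (k+3)) ∉ pvAll4)) then
        (j, genes ++ [String.ofList gen])
      else (j, genes)
    else pvInnerA g i genes rest

-- A's 'while i < len(genoma) - 2' loop (fuel = len genoma suffices: i grows every turn)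
def pvLoopA (g : List Char) : Nat → Int → List String → List String
  | 0, _, genes => genes
  | fuel+1, i, genes =>
    if i < (g.length : Int) - 2 then
      if PySem.List.slice g (some i) (some (i+3)) = ['A','T','G'] then
        let r := pvInnerA g i genes (PySem.List.pyRange (i+3) ((g.length : Int) - 2) 3)
        pvLoopA g fuel (r.1 + 1) r.2
      else pvLoopA g fuel (i+1) genes
    else genes

def encontrar_genes (genoma : String) : List String :=
  let g := genoma.toList
  let genes := pvLoopA g g.length 0 []
  if genes = [] then ["No se encontró ningún gen"] else genes

-- ===== PORT B =====
-- B's backward pass: rev_stop / rev_atg grown by append, each reading its own [-3]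
def pvBuildB (g : List Char) : List (Option Int) × List (Option Int) :=
  (PySem.List.pyRange ((g.length : Int) - 3) (-1) (-1)).foldl
    (fun st p =>
      let cod := PySem.List.slice g (some p) (some (p+3))
      (st.1 ++ [if cod ∈ pvStops then some p else PySem.List.pyGetD st.1 (-3) none],
       st.2 ++ [if cod = ['A','T','G'] then some p else PySem.List.pyGetD st.2 (-3) none]))
    ([none, none, none], [none, none, none])

-- B's 'while i < n - 2' loop: two table lookups instead of a rescan
def pvLoopB (g : List Char) (ns na : List (Option Int)) : Nat → Int → List String → List String
  | 0, _, genes => genes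
  | fuel+1, i, genes =>
    if i < (g.length : Int) - 2 then
      if PySem.List.slice g (some i) (some (i+3)) = ['A','T','G'] then
        match PySem.List.pyGetD ns (i+3) none with
        | none => pvLoopB g ns na fuel (i+1) genes
        | some j =>
          let genes' :=
            if (decide (i + 3 < j) &&
                (match PySem.List.pyGetD na (i+3) none with
                 | none => true
                 | some a => decide (j ≤ a))) = true then
              genes ++ [String.ofList (PySem.List.slice g (some (i+3)) (some j))]
            else genes
          pvLoopB g ns na fuel (j+1) genes'
      else pvLoopB g ns na fuel (i+1) genes
    else genes

def encontrar_genes_alt (genoma : String) : List String :=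
  let g := genoma.toList
  let b := pvBuildB g
  let ns := b.1.reverse
  let na := b.2.reverse
  let genes := pvLoopB g ns na g.length 0 []
  if genes = [] then ["No se encontró ningún gen"] else genes

-- ===== PRECONDITION & SPEC =====
def Spec_encontrar_genes (genoma : String) (out : List String) : Prop := out = encontrar_genes_alt genoma
instance (genoma : String) (out : List String) : Decidable (Spec_encontrar_genes genoma out) := by unfold Spec_encontrar_genes; infer_instance

-- ===== CLAIM (what is proved, stated in full; the proofs are below) =====
def Claim_equal_encontrar_genes : Prop := ∀ (genoma : String), Dom_encontrar_genes genoma → Spec_encontrar_genes genoma (encontrar_genes genoma)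

-- ===== LEMMAS AND PROOFS =====

def pvCodon (g : List Char) (p : Nat) : List Char := (g.drop p).take 3
def pvFirst (g : List Char) (P : List Char → Bool) (p : Nat) : Option Nat :=
  if _h : p + 3 ≤ g.length then
    (if P (pvCodon g p) then some p else pvFirst g P (p+3))
  else none
termination_by g.length - p
decreasing_by omega

theorem pvFirst_some (g : List Char) (P : List Char → Bool) (p j : Nat) (h : pvFirst g P p = some j) :
    p ≤ j ∧ j + 3 ≤ g.length ∧ (j - p) % 3 = 0 ∧ P (pvCodon g j) = true := by
  fun_induction pvFirst g P p with
  | case1 p h3 hP => simp at h; subst h; exact ⟨le_refl _, h3, by omega, hP⟩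
  | case2 p h3 hP ih =>
      obtain ⟨h1, h2, h3', h4⟩ := ih h
      exact ⟨by omega, h2, by omega, h4⟩
  | case3 p h3 => simp at h

theorem pvFirst_min (g : List Char) (P : List Char → Bool) (p j : Nat) (h : pvFirst g P p = some j) :
    ∀ q, p ≤ q → q < j → (q - p) % 3 = 0 → P (pvCodon g q) = false := by
  fun_induction pvFirst g P p with
  | case1 p h3 hP => simp at h; subst h; intro q h1 h2 h3'; omega
  | case2 p h3 hP ih =>
      intro q h1 h2 h3'
      rcases Nat.eq_or_lt_of_le h1 with rfl | hlt
      · exact Bool.not_eq_true _ |>.mp hP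
      · have : p + 3 ≤ q := by omega
        exact ih h q this h2 (by omega)
  | case3 p h3 => simp at h

theorem pvFirst_none (g : List Char) (P : List Char → Bool) (p : Nat) (h : pvFirst g P p = none) :
    ∀ q, p ≤ q → (q - p) % 3 = 0 → q + 3 ≤ g.length → P (pvCodon g q) = false := by
  fun_induction pvFirst g P p with
  | case1 p h3 hP => simp at h
  | case2 p h3 hP ih =>
      intro q h1 h2 h3'
      rcases Nat.eq_or_lt_of_le h1 with rfl | hlt
      · exact Bool.not_eq_true _ |>.mp hP
      · exact ih h q (by omega) (by omega) h3'
  | case3 p h3 => intro q h1 h2 h3'; omega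

theorem pvRange3_all (m : Int) (hm : 0 ≤ m) (f : Int → Bool) :
    (PySem.List.pyRange 0 m 3).all f = true ↔ ∀ t : Nat, 3*(t:Int) < m → f (3*t) = true := by
  rw [PySem.List.pyRange_of_pos 0 m (by norm_num)]
  by_cases h : (0:Int) < m
  · rw [if_pos h]
    simp only [List.all_map, List.all_eq_true, List.mem_range]
    constructor
    · intro hh t ht
      have : t < ((m - 0 + 3 - 1) / 3).toNat := by omega
      simpa using hh t this
    · intro hh t ht
      have := hh t (by omega)
      simpa using this
  · rw [if_neg h]
    simp
    intro t ht; omega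

def pvOI : Option Nat → Option Int
  | none => none
  | some x => some (x : Int)

def pvFS (g : List Char) (p : Nat) : Option Nat := pvFirst g (fun c => decide (c ∈ pvStops)) p
def pvFA (g : List Char) (p : Nat) : Option Nat := pvFirst g (fun c => decide (c = ['A','T','G'])) p

-- the gene slice is a drop-take of length j - p
theorem pvGen_eq (g : List Char) (p j : Nat) :
    PySem.List.slice g (some (p : Int)) (some (j : Int)) = (g.drop p).take (j - p) := by
  simpa using PySem.List.slice_natCast g p j

theorem pvGen_len (g : List Char) (p j : Nat) (h1 : p ≤ j) (h2 : j ≤ g.length) :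
    ((g.drop p).take (j - p)).length = j - p := by
  simp; omega

-- chunk k = 3t of the gene is the codon at p + 3t
theorem pvChunk_eq (g : List Char) (p j t : Nat) (h1 : 3*t + 3 ≤ j - p) :
    PySem.List.slice ((g.drop p).take (j - p)) (some ((3*t : Nat) : Int)) (some (((3*t : Nat) : Int) + 3))
      = pvCodon g (p + 3*t) := by
  have h := PySem.List.slice_natCast_add ((g.drop p).take (j - p)) (3*t) 3
  simp only [Nat.cast_ofNat] at h ⊢
  rw [show ((3*t : Nat) : Int) + 3 = ((3*t : Nat) : Int) + ((3:Nat) : Int) by push_cast; ring] at h ⊢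
  rw [h, List.drop_take, List.take_take, List.drop_drop]
  unfold pvCodon
  rw [min_eq_left (by omega)]

theorem pvCond_eq (g : List Char) (k j : Nat) (hfs : pvFS g (k+3) = some j) :
    ((PySem.List.slice g (some ((k : Int)+3)) (some (j : Int)) ≠ [] ∧
      (PySem.List.pyRange 0 ((PySem.List.slice g (some ((k : Int)+3)) (some (j : Int))).length : Int) 3).all
        (fun kk => decide (PySem.List.slice (PySem.List.slice g (some ((k : Int)+3)) (some (j : Int))) (some kk) (some (kk+3)) ∉ pvAll4)))
     ↔ ((decide ((k : Int) + 3 < (j : Int)) &&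
         (match pvOI (pvFA g (k+3)) with
          | none => true
          | some a => decide ((j : Int) ≤ a))) = true)) := by
  set p : Nat := k + 3 with hp
  obtain ⟨hpj, hjn, hmod, hstop⟩ := pvFirst_some _ _ _ _ hfs
  have hmin := pvFirst_min _ _ _ _ hfs
  have hcast : (k : Int) + 3 = ((p : Nat) : Int) := by push_cast; omega
  rw [hcast, pvGen_eq]
  have hlen := pvGen_len g p j hpj (by omega)
  rw [hlen]
  -- rewrite the all into a ∀ over chunks
  rw [pvRange3_all ((j - p : Nat) : Int) (by positivity) _]
  -- each chunk is a codon, and chunks are never stops (minimality), so the test is "no ATG"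
  have hchunk : ∀ t : Nat, 3*(t:Int) < ((j - p : Nat) : Int) →
      ((fun kk => decide (PySem.List.slice ((g.drop p).take (j - p)) (some kk) (some (kk+3)) ∉ pvAll4)) (3*(t:Nat)) = true
        ↔ pvCodon g (p + 3*t) ≠ ['A','T','G']) := by
    intro t ht
    have h33 : 3*t + 3 ≤ j - p := by omega
    simp only [show ((3*(t:Nat)) : Int) = (((3*t : Nat) : Nat) : Int) by push_cast; ring]
    rw [pvChunk_eq g p j t h33]
    have hns : pvCodon g (p + 3*t) ∉ pvStops := by
      have := hmin (p + 3*t) (by omega) (by omega) (by omega)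
      simpa using this
    constructor
    · intro hh hatg
      simp only [decide_eq_true_eq] at hh
      exact hh (by simp [pvAll4, hatg])
    · intro hh
      simp only [decide_eq_true_eq]
      intro hmem
      simp only [pvAll4] at hmem
      simp only [pvStops] at hns
      simp at hmem hns
      tauto
  have hnil : ((g.drop p).take (j - p) = []) ↔ j - p = 0 := by
    rw [← List.length_eq_zero_iff, hlen]
  cases hfa : pvFA g p with
  | none =>
      simp only [pvOI]
      constructor
      · rintro ⟨hne, -⟩
        have hplt : p < j := by have := (not_congr hnil).mp hne; omega
        simp only [Bool.and_eq_true, decide_eq_true_eq, and_true]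
        exact_mod_cast hplt
      · intro hb
        simp only [Bool.and_eq_true, decide_eq_true_eq, and_true] at hb
        have hplt : p < j := by exact_mod_cast hb
        refine ⟨(not_congr hnil).mpr (by omega), ?_⟩
        intro t ht
        have htn : 3*t < j - p := by exact_mod_cast ht
        rw [hchunk t ht]
        intro hatg
        have hnone := pvFirst_none _ _ _ hfa (p+3*t) (by omega) (by omega) (by omega)
        simp [hatg] at hnone
  | some a =>
      obtain ⟨hpa, han, hamod, hatg⟩ := pvFirst_some _ _ _ _ hfa
      have hamin := pvFirst_min _ _ _ _ hfa
      simp only [pvOI]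
      constructor
      · rintro ⟨hne, hall⟩
        have hplt : p < j := by have := (not_congr hnil).mp hne; omega
        have hja : j ≤ a := by
          by_contra hlt
          have hlt' : a < j := by omega
          have ht3 : 3*((a-p)/3) = a - p := by omega
          clear hlt
          have h3 : 3*((((a-p)/3) : Nat) : Int) < ((j-p : Nat) : Int) := by push_cast; omega
          have hres := (hchunk _ h3).mp (hall _ h3)
          apply hres
          rw [show p + 3*((a-p)/3) = a by omega]
          simpa using hatg
        simp only [Bool.and_eq_true, decide_eq_true_eq]
        exact ⟨by exact_mod_cast hplt, by exact_mod_cast hja⟩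
      · intro hb
        simp only [Bool.and_eq_true, decide_eq_true_eq] at hb
        have hplt : p < j := by exact_mod_cast hb.1
        have hja : j ≤ a := by exact_mod_cast hb.2
        refine ⟨(not_congr hnil).mpr (by omega), ?_⟩
        intro t ht
        have htn : 3*t < j - p := by exact_mod_cast ht
        rw [hchunk t ht]
        intro hatg'
        have := hamin (p+3*t) (by omega) (by omega) (by omega)
        simp [hatg'] at this

theorem pvRange3_nil (a b : Int) (h : b ≤ a) : PySem.List.pyRange a b 3 = [] := by
  rw [PySem.List.pyRange_of_pos a b (by norm_num)]
  rw [if_neg (by omega)]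
  simp

theorem pvRange3_cons (a b : Int) (h : a < b) :
    PySem.List.pyRange a b 3 = a :: PySem.List.pyRange (a+3) b 3 := by
  rw [PySem.List.pyRange_of_pos a b (by norm_num), PySem.List.pyRange_of_pos (a+3) b (by norm_num)]
  rw [if_pos h]
  by_cases h2 : a + 3 < b
  · rw [if_pos h2]
    have hN : ((b - a + 3 - 1) / 3).toNat = ((b - (a+3) + 3 - 1) / 3).toNat + 1 := by omega
    rw [hN, List.range_succ_eq_map]
    simp [List.map_map, Function.comp]
    intro k _; ring
  · rw [if_neg h2]
    have hN : ((b - a + 3 - 1) / 3).toNat = 1 := by omega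
    rw [hN]
    simp

theorem pvCodon_slice (g : List Char) (p : Nat) :
    PySem.List.slice g (some (p : Int)) (some ((p : Int)+3)) = pvCodon g p := by
  rw [show ((p : Int) + 3) = ((p : Int) + ((3:Nat) : Int)) by push_cast; ring]
  simpa [pvCodon] using PySem.List.slice_natCast_add g p 3

theorem pvInnerA_eq (g : List Char) (i : Int) (genes : List String) (p : Nat) :
    pvInnerA g i genes (PySem.List.pyRange (p : Int) ((g.length : Int) - 2) 3) =
      (match pvFS g p with
      | none => (i, genes)
      | some j =>
        (if PySem.List.slice g (some (i+3)) (some (j : Int)) ≠ [] ∧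
             (PySem.List.pyRange 0 ((PySem.List.slice g (some (i+3)) (some (j : Int))).length : Int) 3).all
               (fun k => decide (PySem.List.slice (PySem.List.slice g (some (i+3)) (some (j : Int))) (some k) (some (k+3)) ∉ pvAll4)) then
            ((j : Int), genes ++ [String.ofList (PySem.List.slice g (some (i+3)) (some (j : Int)))])
          else ((j : Int), genes))) := by
  by_cases h3 : p + 3 ≤ g.length
  · rw [pvRange3_cons _ _ (by push_cast; omega)]
    unfold pvInnerA
    simp only [pvCodon_slice g p]
    by_cases hstop : pvCodon g p ∈ pvStops
    · rw [if_pos hstop]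
      have : pvFS g p = some p := by
        unfold pvFS pvFirst
        rw [dif_pos h3, if_pos (by simpa using hstop)]
      rw [this]
    · rw [if_neg hstop]
      have hrec : pvFS g p = pvFS g (p+3) := by
        unfold pvFS
        conv_lhs => rw [pvFirst]
        rw [dif_pos h3, if_neg (by simpa using hstop)]
      rw [show ((p : Int) + 3) = (((p+3 : Nat)) : Int) by push_cast; ring]
      rw [pvInnerA_eq g i genes (p+3), hrec]
  · rw [pvRange3_nil _ _ (by push_cast; omega)]
    have : pvFS g p = none := by
      unfold pvFS pvFirst
      rw [dif_neg h3]
    rw [this]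
    rfl
termination_by g.length - p
decreasing_by omega

def pvRevS (g : List Char) (c : Nat) : List (Option Int) :=
  [none, none, none] ++ (List.range c).map (fun t => pvOI (pvFS g (g.length - 3 - t)))
def pvRevA (g : List Char) (c : Nat) : List (Option Int) :=
  [none, none, none] ++ (List.range c).map (fun t => pvOI (pvFA g (g.length - 3 - t)))

theorem pvRevS_len (g : List Char) (c : Nat) : (pvRevS g c).length = 3 + c := by
  simp [pvRevS]; omega
theorem pvRevA_len (g : List Char) (c : Nat) : (pvRevA g c).length = 3 + c := by
  simp [pvRevA]; omega

theorem pvFS_big (g : List Char) (p : Nat) (h : ¬ (p + 3 ≤ g.length)) : pvFS g p = none := by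
  unfold pvFS; rw [pvFirst, dif_neg h]
theorem pvFA_big (g : List Char) (p : Nat) (h : ¬ (p + 3 ≤ g.length)) : pvFA g p = none := by
  unfold pvFA; rw [pvFirst, dif_neg h]

theorem pvTripleNone {α : Type} (i : Nat) (h : i < ([none,none,none] : List (Option α)).length) :
    ([none,none,none] : List (Option α))[i] = none := by
  match i with
  | 0 => rfl
  | 1 => rfl
  | 2 => rfl
  | n+3 => simp at h

theorem pvRevS_m3 (g : List Char) (c : Nat) (hcn : c ≤ g.length - 3) (h3 : 3 ≤ g.length) :
    PySem.List.pyGetD (pvRevS g c) (-3) none = pvOI (pvFS g (g.length - c)) := by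
  rw [PySem.List.pyGetD_neg_ofNat _ 3 none (by norm_num) (by rw [pvRevS_len]; omega)]
  by_cases hc : c < 3
  · have hnone : pvFS g (g.length - c) = none := pvFS_big g _ (by omega)
    rw [hnone]
    unfold pvRevS
    rw [List.getElem_append_left (by simp; omega)]
    exact pvTripleNone _ _
  · unfold pvRevS
    rw [List.getElem_append_right (by simp; omega)]
    simp only [List.length_cons, List.length_nil, List.getElem_map, List.getElem_range,
      List.length_append, List.length_map, List.length_range]
    congr 2
    omega

theorem pvRevA_m3 (g : List Char) (c : Nat) (hcn : c ≤ g.length - 3) (h3 : 3 ≤ g.length) :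
    PySem.List.pyGetD (pvRevA g c) (-3) none = pvOI (pvFA g (g.length - c)) := by
  rw [PySem.List.pyGetD_neg_ofNat _ 3 none (by norm_num) (by rw [pvRevA_len]; omega)]
  by_cases hc : c < 3
  · have hnone : pvFA g (g.length - c) = none := pvFA_big g _ (by omega)
    rw [hnone]
    unfold pvRevA
    rw [List.getElem_append_left (by simp; omega)]
    exact pvTripleNone _ _
  · unfold pvRevA
    rw [List.getElem_append_right (by simp; omega)]
    simp only [List.length_cons, List.length_nil, List.getElem_map, List.getElem_range,
      List.length_append, List.length_map, List.length_range]
    congr 2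
    omega

theorem pvBuild_inv (g : List Char) : ∀ (r c : Nat), c + r = g.length - 2 →
    (PySem.List.pyRange ((g.length : Int) - 3 - c) (-1) (-1)).foldl
      (fun st p =>
        let cod := PySem.List.slice g (some p) (some (p+3))
        (st.1 ++ [if cod ∈ pvStops then some p else PySem.List.pyGetD st.1 (-3) none],
         st.2 ++ [if cod = ['A','T','G'] then some p else PySem.List.pyGetD st.2 (-3) none]))
      (pvRevS g c, pvRevA g c)
    = (pvRevS g (g.length - 2), pvRevA g (g.length - 2)) := by
  intro r
  induction r with
  | zero =>
      intro c hc
      rw [PySem.List.pyRange_neg_one_eq_nil (by omega)]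
      simp only [List.foldl_nil]
      rw [show c = g.length - 2 by omega]
  | succ r ih =>
      intro c hc
      have h3 : 3 ≤ g.length := by omega
      have hcn : c ≤ g.length - 3 := by omega
      set pN : Nat := g.length - 3 - c with hpN
      have hpcast : (g.length : Int) - 3 - c = ((pN : Nat) : Int) := by push_cast; omega
      rw [hpcast, PySem.List.pyRange_neg_one_cons (by push_cast; omega)]
      rw [List.foldl_cons]
      have hstep :
          (let cod := PySem.List.slice g (some ((pN : Nat) : Int)) (some (((pN : Nat) : Int) + 3))
           ((pvRevS g c, pvRevA g c).1 ++ [if cod ∈ pvStops then some ((pN : Nat) : Int) else PySem.List.pyGetD (pvRevS g c, pvRevA g c).1 (-3) none],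
            (pvRevS g c, pvRevA g c).2 ++ [if cod = ['A','T','G'] then some ((pN : Nat) : Int) else PySem.List.pyGetD (pvRevS g c, pvRevA g c).2 (-3) none]))
          = (pvRevS g (c+1), pvRevA g (c+1)) := by
        dsimp only
        rw [pvCodon_slice g pN]
        rw [pvRevS_m3 g c hcn h3, pvRevA_m3 g c hcn h3]
        have hfseq : (if pvCodon g pN ∈ pvStops then some ((pN : Nat) : Int) else pvOI (pvFS g (g.length - c)))
            = pvOI (pvFS g pN) := by
          conv_rhs => rw [show pvFS g pN = pvFirst g (fun c => decide (c ∈ pvStops)) pN from rfl, pvFirst]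
          rw [dif_pos (by omega)]
          by_cases hs : pvCodon g pN ∈ pvStops
          · rw [if_pos hs, if_pos (by simpa using hs)]; rfl
          · rw [if_neg hs, if_neg (by simpa using hs)]
            rw [show pN + 3 = g.length - c by omega]
            rfl
        have hfaeq : (if pvCodon g pN = ['A','T','G'] then some ((pN : Nat) : Int) else pvOI (pvFA g (g.length - c)))
            = pvOI (pvFA g pN) := by
          conv_rhs => rw [show pvFA g pN = pvFirst g (fun c => decide (c = ['A','T','G'])) pN from rfl, pvFirst]
          rw [dif_pos (by omega)]
          by_cases hs : pvCodon g pN = ['A','T','G']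
          · rw [if_pos hs, if_pos (by simpa using hs)]; rfl
          · rw [if_neg hs, if_neg (by simpa using hs)]
            rw [show pN + 3 = g.length - c by omega]
            rfl
        rw [hfseq, hfaeq]
        unfold pvRevS pvRevA
        rw [List.range_succ]
        simp only [List.map_append, List.map_cons, List.map_nil, List.append_assoc]
        rw [show g.length - 3 - c = pN from rfl]
      rw [hstep]
      have := ih (c+1) (by omega)
      rw [show ((g.length : Int) - 3 - ((c+1 : Nat) : Int)) = ((pN : Nat) : Int) - 1 by push_cast; omega] at this
      exact this

theorem pvBuildB_eq (g : List Char) :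
    pvBuildB g = (pvRevS g (g.length - 2), pvRevA g (g.length - 2)) := by
  have := pvBuild_inv g (g.length - 2) 0 (by omega)
  unfold pvBuildB
  rw [show ((g.length : Int) - 3) = ((g.length : Int) - 3 - (0:Nat)) by push_cast; ring]
  have h0 : (([none, none, none], [none, none, none]) : List (Option Int) × List (Option Int))
      = (pvRevS g 0, pvRevA g 0) := by simp [pvRevS, pvRevA]
  rw [h0]
  exact this

theorem pvNS_lookup (g : List Char) (q : Nat) (hq : q ≤ g.length) :
    PySem.List.pyGetD (pvRevS g (g.length - 2)).reverse (q : Int) none = pvOI (pvFS g q) := by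
  by_cases h3 : 3 ≤ g.length
  · have hlen : (pvRevS g (g.length - 2)).reverse.length = g.length + 1 := by
      rw [List.length_reverse, pvRevS_len]; omega
    rw [PySem.List.pyGetD_eq_getElem _ none (by positivity) (by rw [hlen]; push_cast; omega)]
    simp only [Int.toNat_natCast]
    rw [List.getElem_reverse]
    by_cases hq3 : q ≤ g.length - 3
    · unfold pvRevS
      rw [List.getElem_append_right (by simp [pvRevS_len]; omega)]
      simp only [List.length_cons, List.length_nil, List.getElem_map, List.getElem_range,
        List.length_append, List.length_map, List.length_range, List.length_reverse]
      congr 2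
      omega
    · have hnone : pvFS g q = none := pvFS_big g _ (by omega)
      rw [hnone]
      unfold pvRevS
      rw [List.getElem_append_left (by simp [pvRevS_len]; omega)]
      exact pvTripleNone _ _
  · have h0 : g.length - 2 = 0 := by omega
    rw [h0]
    have hnone : pvFS g q = none := pvFS_big g _ (by omega)
    rw [hnone]
    have : pvRevS g 0 = [none, none, none] := by simp [pvRevS]
    rw [this]
    rw [PySem.List.pyGetD_eq_getElem _ none (by positivity) (by simp; push_cast; omega)]
    simp only [Int.toNat_natCast]
    exact pvTripleNone _ _

theorem pvNA_lookup (g : List Char) (q : Nat) (hq : q ≤ g.length) :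
    PySem.List.pyGetD (pvRevA g (g.length - 2)).reverse (q : Int) none = pvOI (pvFA g q) := by
  by_cases h3 : 3 ≤ g.length
  · have hlen : (pvRevA g (g.length - 2)).reverse.length = g.length + 1 := by
      rw [List.length_reverse, pvRevA_len]; omega
    rw [PySem.List.pyGetD_eq_getElem _ none (by positivity) (by rw [hlen]; push_cast; omega)]
    simp only [Int.toNat_natCast]
    rw [List.getElem_reverse]
    by_cases hq3 : q ≤ g.length - 3
    · unfold pvRevA
      rw [List.getElem_append_right (by simp [pvRevA_len]; omega)]
      simp only [List.length_cons, List.length_nil, List.getElem_map, List.getElem_range,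
        List.length_append, List.length_map, List.length_range, List.length_reverse]
      congr 2
      omega
    · have hnone : pvFA g q = none := pvFA_big g _ (by omega)
      rw [hnone]
      unfold pvRevA
      rw [List.getElem_append_left (by simp [pvRevA_len]; omega)]
      exact pvTripleNone _ _
  · have h0 : g.length - 2 = 0 := by omega
    rw [h0]
    have hnone : pvFA g q = none := pvFA_big g _ (by omega)
    rw [hnone]
    have : pvRevA g 0 = [none, none, none] := by simp [pvRevA]
    rw [this]
    rw [PySem.List.pyGetD_eq_getElem _ none (by positivity) (by simp; push_cast; omega)]
    simp only [Int.toNat_natCast]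
    exact pvTripleNone _ _

theorem pvLoop_eq (g : List Char) (ns na : List (Option Int))
    (hns : ∀ q : Nat, q ≤ g.length → PySem.List.pyGetD ns (q : Int) none = pvOI (pvFS g q))
    (hna : ∀ q : Nat, q ≤ g.length → PySem.List.pyGetD na (q : Int) none = pvOI (pvFA g q)) :
    ∀ (fuel : Nat) (k : Nat) (genes : List String),
      pvLoopA g fuel (k : Int) genes = pvLoopB g ns na fuel (k : Int) genes := by
  intro fuel
  induction fuel with
  | zero => intro k genes; rfl
  | succ fuel ih =>
      intro k genes
      rw [pvLoopA, pvLoopB]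
      by_cases hguard : (k : Int) < (g.length : Int) - 2
      · rw [if_pos hguard, if_pos hguard]
        have hk3 : k + 3 ≤ g.length := by omega
        by_cases hatg : PySem.List.slice g (some (k : Int)) (some ((k : Int)+3)) = ['A','T','G']
        · rw [if_pos hatg, if_pos hatg]
          dsimp only
          rw [show (k : Int) + 3 = ((k+3 : Nat) : Int) by push_cast; ring]
          rw [pvInnerA_eq g (k : Int) genes (k+3)]
          rw [show (k : Int) + 3 = ((k+3 : Nat) : Int) by push_cast; ring]
          rw [hns (k+3) hk3, hna (k+3) hk3]
          cases hfs : pvFS g (k+3) with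
          | none =>
              simp only [pvOI]
              rw [show (k : Int) + 1 = ((k+1 : Nat) : Int) by push_cast; ring]
              exact ih (k+1) genes
          | some j =>
              simp only [pvOI]
              have hcond := pvCond_eq g k j hfs
              rw [show (k : Int) + 3 = ((k+3 : Nat) : Int) by push_cast; ring] at hcond
              simp only [pvOI] at hcond
              by_cases hc : (PySem.List.slice g (some (((k+3:Nat)) : Int)) (some (j : Int)) ≠ [] ∧
                  (PySem.List.pyRange 0 ((PySem.List.slice g (some (((k+3:Nat)) : Int)) (some (j : Int))).length : Int) 3).all
                    (fun kk => decide (PySem.List.slice (PySem.List.slice g (some (((k+3:Nat)) : Int)) (some (j : Int))) (some kk) (some (kk+3)) ∉ pvAll4)) = true)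
              · rw [if_pos hc, if_pos (hcond.mp hc)]
                dsimp only
                rw [show (j : Int) + 1 = ((j+1 : Nat) : Int) by push_cast; ring]
                exact ih (j+1) _
              · rw [if_neg hc, if_neg (fun hb => hc (hcond.mpr hb))]
                dsimp only
                rw [show (j : Int) + 1 = ((j+1 : Nat) : Int) by push_cast; ring]
                exact ih (j+1) _
        · rw [if_neg hatg, if_neg hatg]
          rw [show (k : Int) + 1 = ((k+1 : Nat) : Int) by push_cast; ring]
          exact ih (k+1) genes
      · rw [if_neg hguard, if_neg hguard]


-- ===== VERDICT (by name: the statement is the Claim_ definition above) =====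
theorem encontrar_genes_spec : Claim_equal_encontrar_genes := by
  intro genoma _hdom
  unfold Spec_encontrar_genes
  dsimp only [encontrar_genes, encontrar_genes_alt]
  rw [pvBuildB_eq]
  dsimp only
  have h := pvLoop_eq genoma.toList _ _
    (fun q hq => pvNS_lookup genoma.toList q hq)
    (fun q hq => pvNA_lookup genoma.toList q hq)
    genoma.toList.length 0 []
  simp only [Nat.cast_zero] at h
  rw [h]
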